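-- pv_equiv track=rewrite | github.com/crazybigcat/GTNC | library/BasicFunctions_szz.py | issubdict
-- ===== SOURCE A (Python) =====
-- import operator
--
-- def issubdict(a, b):
--     # check keys
--     if set(a.keys()).issubset(set(b.keys())):
--         flag = True
--         for key in a.keys():
--             if not operator.eq(a[key], b[key]):
--                 flag = False
--         return flag
--     else:
--         return False
-- ===== SOURCE B (Python) =====
-- def issubdict(a, b):
--     # a is a sub-dictionary of b iff a's items-view is a subset of b's:
--     # compare whole (key, value) pairs at once, never index b by key.
--     return a.items() <= b.items()
-- ===== Notes on version B (the rewrite author's own statement) =====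
-- stated objective: simpler
-- what changed: Replaces A's key-set construction + subset test followed by a flag-accumulating loop that indexes both dicts with a single items-view subset test (a.items() <= b.items()) comparing whole (key,value) pairs and never indexing b; Pre_ only states the dict invariant (no duplicate keys in either association list), which every real Python dict satisfies.
import Mathlib
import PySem

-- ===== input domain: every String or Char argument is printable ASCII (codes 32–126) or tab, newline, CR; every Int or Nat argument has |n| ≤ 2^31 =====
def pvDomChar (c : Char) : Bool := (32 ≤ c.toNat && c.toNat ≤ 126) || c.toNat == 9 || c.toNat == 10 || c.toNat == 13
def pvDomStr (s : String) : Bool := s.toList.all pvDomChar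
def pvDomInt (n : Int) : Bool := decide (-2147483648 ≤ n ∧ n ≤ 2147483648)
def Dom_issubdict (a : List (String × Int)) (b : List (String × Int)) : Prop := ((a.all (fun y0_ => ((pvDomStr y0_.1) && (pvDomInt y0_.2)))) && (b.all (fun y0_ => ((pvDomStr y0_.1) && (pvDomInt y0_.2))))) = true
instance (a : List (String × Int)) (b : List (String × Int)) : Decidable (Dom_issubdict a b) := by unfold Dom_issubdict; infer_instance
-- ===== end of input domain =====

-- B replaces A's key-set subset test + value loop with dict indexing by one items-view
-- subset test over whole (key,value) pairs (objective: simpler).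
-- ===== PORT A =====
-- first-match association-list lookup = Python dict indexing d[k]
def dlook : List (String × Int) → String → Option Int
  | [], _ => none
  | (k, v) :: rest, x => if k == x then some v else dlook rest x

def issubdict (a : List (String × Int)) (b : List (String × Int)) : Bool :=
  -- set(a.keys()).issubset(set(b.keys()))
  if (a.map Prod.fst).all (fun k => (b.map Prod.fst).contains k) then
    -- flag = True; for key in a.keys(): if not operator.eq(a[key], b[key]): flag = False
    (a.map Prod.fst).foldl (fun flag k => if dlook a k == dlook b k then flag else false) true
  else
    false

-- ===== PORT B =====
def issubdict_alt (a : List (String × Int)) (b : List (String × Int)) : Bool :=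
  -- a.items() <= b.items(): every (key, value) pair of a is a pair of b
  a.all (fun kv => b.contains kv)

-- ===== PRECONDITION & SPEC =====
-- Pre_ states only the dict invariant: the association lists have no duplicate keys,
-- since a Python dict cannot contain two entries with the same key.
def Pre_issubdict (a : List (String × Int)) (b : List (String × Int)) : Prop :=
  (a.map Prod.fst).Nodup ∧ (b.map Prod.fst).Nodup
instance (a : List (String × Int)) (b : List (String × Int)) : Decidable (Pre_issubdict a b) := by unfold Pre_issubdict; infer_instance
def pvWitness_issubdict : (List (String × Int)) × (List (String × Int)) :=
  ([("a", 1)], [("a", 1), ("b", 2)])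

def Spec_issubdict (a : List (String × Int)) (b : List (String × Int)) (out : Bool) : Prop := out = issubdict_alt a b
instance (a : List (String × Int)) (b : List (String × Int)) (out : Bool) : Decidable (Spec_issubdict a b out) := by unfold Spec_issubdict; infer_instance

-- ===== CLAIM (what is proved, stated in full; the proofs are below) =====
def Claim_equal_issubdict : Prop := ∀ (a : List (String × Int)) (b : List (String × Int)), Dom_issubdict a b → Pre_issubdict a b → Spec_issubdict a b (issubdict a b)

-- ===== LEMMAS AND PROOFS =====
-- A's non-short-circuiting flag loop is 'flag && all'
theorem foldl_flag (q : String → Bool) (l : List String) (flag : Bool) :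
    l.foldl (fun f k => if q k then f else false) flag = (flag && l.all q) := by
  induction l generalizing flag with
  | nil => simp
  | cons x xs ih =>
    simp only [List.foldl_cons, List.all_cons]
    rw [ih]
    cases h : q x <;> simp

-- two full passes equal one combined pass
theorem all_and (p q : String → Bool) (l : List String) :
    (l.all p && l.all q) = l.all (fun k => p k && q k) := by
  induction l with
  | nil => simp
  | cons x xs ih =>
    cases hp : p x <;> cases hq : q x <;> simp [List.all_cons, hp, hq, ← ih]

-- pointwise congruence for all
theorem all_congr_mem {α : Type} (l : List α) (p q : α → Bool)
    (h : ∀ x ∈ l, p x = q x) : l.all p = l.all q := by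
  induction l with
  | nil => rfl
  | cons x xs ih =>
    simp only [List.all_cons]
    rw [h x (by simp), ih (fun y hy => h y (by simp [hy]))]

-- dict invariant characterization: membership of a pair = successful lookup of its value
theorem mem_iff_dlook (b : List (String × Int)) (hb : (b.map Prod.fst).Nodup)
    (kv : String × Int) : kv ∈ b ↔ dlook b kv.1 = some kv.2 := by
  induction b with
  | nil => simp [dlook]
  | cons x xs ih =>
    obtain ⟨k', v'⟩ := x
    simp only [List.map_cons, List.nodup_cons] at hb
    by_cases hk : k' = kv.1
    · subst hk
      have hnx : kv ∉ xs := fun hmem => hb.1 (List.mem_map_of_mem hmem)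
      simp only [dlook, BEq.rfl, if_pos, List.mem_cons]
      constructor
      · rintro (h | h)
        · rw [h]
        · exact absurd h hnx
      · intro h
        left
        obtain ⟨k, v⟩ := kv
        simp only [Option.some.injEq] at h
        simp [h]
    · have hkb : (k' == kv.1) = false := by simp [hk]
      simp only [dlook, hkb, if_neg, Bool.false_eq_true, not_false_iff, List.mem_cons]
      rw [← ih hb.2]
      constructor
      · rintro (h | h)
        · exact absurd (by rw [h]) hk
        · exact h
      · exact Or.inr

-- pair membership vs lookup, as Bool
theorem contains_pair (b : List (String × Int)) (hb : (b.map Prod.fst).Nodup)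
    (kv : String × Int) : b.contains kv = (dlook b kv.1 == some kv.2) := by
  apply Bool.eq_iff_iff.mpr
  simp only [List.contains_iff_mem, beq_iff_eq]
  exact mem_iff_dlook b hb kv

-- membership of a key in b's key list vs lookup success
theorem contains_eq_isSome (b : List (String × Int)) (k : String) :
    (b.map Prod.fst).contains k = (dlook b k).isSome := by
  induction b with
  | nil => simp [dlook]
  | cons kv rest ih =>
    obtain ⟨k', v⟩ := kv
    simp only [List.map_cons, List.contains_cons, dlook]
    cases h : k' == k
    · simp only [BEq.comm (a := k), h, Bool.false_or]
      simpa using ih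
    · simp [BEq.comm (a := k), h]

theorem issubdict_spec : Claim_equal_issubdict := by
  intro a b _ hpre
  obtain ⟨ha, hb⟩ := hpre
  unfold Spec_issubdict issubdict
  have hA : (if (a.map Prod.fst).all (fun k => (b.map Prod.fst).contains k) then
      (a.map Prod.fst).foldl (fun flag k => if dlook a k == dlook b k then flag else false) true
    else false)
      = ((a.map Prod.fst).all (fun k => (b.map Prod.fst).contains k)
         && (a.map Prod.fst).all (fun k => dlook a k == dlook b k)) := by
    by_cases h : ((a.map Prod.fst).all fun k => (b.map Prod.fst).contains k) = true
    · rw [if_pos h, foldl_flag, h]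
    · rw [if_neg h, eq_false_of_ne_true h, Bool.false_and]
  rw [hA, all_and]
  simp only [List.all_map]
  unfold issubdict_alt
  apply all_congr_mem
  intro kv hm
  simp only [Function.comp_def]
  rw [(mem_iff_dlook a ha kv).mp hm, contains_pair b hb, contains_eq_isSome]
  cases h : dlook b kv.1 with
  | none => simp
  | some v => cases h2 : v == kv.2 <;> simp [h2, BEq.comm (a := kv.2), eq_of_beq]

-- ===== VERDICT (by name: the statement is the Claim_ definition above) =====
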